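-- pv_equiv track=rewrite | github.com/JAIKEYSINGH913/ppt-maker | backend/src/md2deck/stages/ingest.py | _split_by_heading
-- ===== SOURCE A (Python) =====
-- def _split_by_heading(text: str, heading_prefix: str) -> dict[str, str]:
--     chunks: dict[str, list[str]] = {}
--     current_heading: str | None = None
--     for line in text.splitlines():
--         if line.startswith(heading_prefix):
--             current_heading = line[len(heading_prefix):].strip()
--             chunks[current_heading] = []
--             continue
--         if current_heading is not None:
--             chunks[current_heading].append(line)
--     return {heading: "\n".join(lines).strip() for heading, lines in chunks.items()}
-- ===== SOURCE B (Python) =====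
-- def _split_by_heading(text: str, heading_prefix: str) -> dict[str, str]:
--     lines = text.splitlines()
--     result: dict[str, str] = {}
--     i, n = 0, len(lines)
--     while i < n:
--         line = lines[i]
--         i += 1
--         if line.startswith(heading_prefix):
--             start = i
--             while i < n and not lines[i].startswith(heading_prefix):
--                 i += 1
--             result[line[len(heading_prefix):].strip()] = "\n".join(lines[start:i]).strip()
--     return result
-- ===== Notes on version B (the rewrite author's own statement) =====
-- stated objective: alternative
-- what changed: B replaces A's line-at-a-time state machine (current-heading register, dict of growing line lists, second join-and-strip pass over the dict) by a single cursor that consumes each heading together with its whole body in one inner scan and assigns the final stripped section string directly.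
import Mathlib
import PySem

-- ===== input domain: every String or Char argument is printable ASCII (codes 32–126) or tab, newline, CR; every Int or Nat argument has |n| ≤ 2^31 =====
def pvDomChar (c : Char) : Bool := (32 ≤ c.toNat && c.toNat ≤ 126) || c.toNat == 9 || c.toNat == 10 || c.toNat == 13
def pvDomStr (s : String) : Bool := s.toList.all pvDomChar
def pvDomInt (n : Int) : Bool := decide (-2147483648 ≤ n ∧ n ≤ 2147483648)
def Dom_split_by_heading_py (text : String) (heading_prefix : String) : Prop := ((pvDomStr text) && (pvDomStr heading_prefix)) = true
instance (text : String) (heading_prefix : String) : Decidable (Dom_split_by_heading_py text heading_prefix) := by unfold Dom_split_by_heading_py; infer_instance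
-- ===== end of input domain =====

-- B consumes each heading together with its whole body in one inner scan (single cursor, final
-- string assigned directly), instead of A's per-line state machine with a current-heading register,
-- a dict of line lists and a second join-and-strip pass; objective: alternative (same cost).

-- ===== PORT A =====
-- loop body of A's 'for line in text.splitlines()', state = (chunks, current_heading)
def pvStepA (heading_prefix : String)
    (st : PySem.Dict String (List String) × Option String) (line : String) :
    PySem.Dict String (List String) × Option String :=
  if PySem.Str.startswith line heading_prefix then
    let h := PySem.Str.strip (PySem.Str.slice line (some (PySem.Str.len heading_prefix)) none)
    (st.1.insert h [], some h)
  else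
    match st.2 with
    | some h => (st.1.modify h [] (fun ls => ls ++ [line]), st.2)
    | none => st

def split_by_heading_py (text : String) (heading_prefix : String) : List (String × String) :=
  let res := (PySem.Str.splitlines text).foldl (pvStepA heading_prefix)
    (PySem.Dict.empty, none)
  res.1.items.map (fun p => (p.1, PySem.Str.strip (PySem.Str.join "\n" p.2)))

-- ===== PORT B =====
-- inner 'while i < n and not lines[i].startswith(heading_prefix): i += 1'
def pvFindEnd (heading_prefix : String) (lines : List String) (n i : Nat) : Nat :=
  if i < n && !(PySem.Str.startswith (lines.getD i "") heading_prefix) then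
    pvFindEnd heading_prefix lines n (i + 1)
  else i
termination_by n - i
decreasing_by simp at *; omega

theorem pvFindEnd_le (heading_prefix : String) (lines : List String) (n i : Nat) :
    i ≤ pvFindEnd heading_prefix lines n i := by
  fun_induction pvFindEnd <;> omega

-- outer 'while i < n' loop of B
def pvAltGo (heading_prefix : String) (lines : List String) (n i : Nat)
    (d : PySem.Dict String String) : PySem.Dict String String :=
  if i < n then
    let line := lines.getD i ""
    if PySem.Str.startswith line heading_prefix then
      let j := pvFindEnd heading_prefix lines n (i + 1)
      pvAltGo heading_prefix lines n j
        (d.insert (PySem.Str.strip (PySem.Str.slice line (some (PySem.Str.len heading_prefix)) none))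
          (PySem.Str.strip (PySem.Str.join "\n"
            (PySem.List.slice lines (some ((i + 1 : Nat) : Int)) (some ((j : Nat) : Int))))))
    else pvAltGo heading_prefix lines n (i + 1) d
  else d
termination_by n - i
decreasing_by
  · have := pvFindEnd_le heading_prefix lines n (i + 1); omega
  · omega

def split_by_heading_py_alt (text : String) (heading_prefix : String) : List (String × String) :=
  let lines := PySem.Str.splitlines text
  (pvAltGo heading_prefix lines lines.length 0 PySem.Dict.empty).items

-- ===== PRECONDITION & SPEC =====
def Spec_split_by_heading_py (text : String) (heading_prefix : String) (out : List (String × String)) : Prop := out = split_by_heading_py_alt text heading_prefix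
instance (text : String) (heading_prefix : String) (out : List (String × String)) : Decidable (Spec_split_by_heading_py text heading_prefix out) := by unfold Spec_split_by_heading_py; infer_instance

-- ===== CLAIM (what is proved, stated in full; the proofs are below) =====
def Claim_equal_split_by_heading_py : Prop := ∀ (text : String) (heading_prefix : String), Dom_split_by_heading_py text heading_prefix → Spec_split_by_heading_py text heading_prefix (split_by_heading_py text heading_prefix)

-- ===== LEMMAS AND PROOFS =====

-- join-and-strip applied by A's final comprehension
def pvF (ls : List String) : String := PySem.Str.strip (PySem.Str.join "\n" ls)

-- A's dict of line lists, with each value joined and stripped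
def pvMapD (d : PySem.Dict String (List String)) : PySem.Dict String String :=
  PySem.Dict.mk (d.items.map (fun p => (p.1, pvF p.2)))

theorem pvMapD_contains (d : PySem.Dict String (List String)) (k : String) :
    (pvMapD d).contains k = d.contains k := by
  simp [pvMapD, PySem.Dict.contains, List.any_map, Function.comp_def]

theorem pvMapD_insert (d : PySem.Dict String (List String)) (k : String) (v : List String) :
    pvMapD (d.insert k v) = (pvMapD d).insert k (pvF v) := by
  apply PySem.Dict.ext
  by_cases hc : d.contains k = true
  · rw [show pvMapD (d.insert k v) = PySem.Dict.mk ((d.insert k v).items.map (fun p => (p.1, pvF p.2))) from rfl,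
      PySem.Dict.items_insert_of_contains d v hc,
      PySem.Dict.items_insert_of_contains (pvMapD d) (pvF v) (by rw [pvMapD_contains]; exact hc)]
    simp only [pvMapD, List.map_map]
    apply List.map_congr_left
    intro p _
    by_cases h1 : p.1 = k <;> simp [h1]
  · rw [show pvMapD (d.insert k v) = PySem.Dict.mk ((d.insert k v).items.map (fun p => (p.1, pvF p.2))) from rfl,
      PySem.Dict.items_insert_of_not_contains d v (by simpa using hc),
      PySem.Dict.items_insert_of_not_contains (pvMapD d) (pvF v) (by rw [pvMapD_contains]; simpa using hc)]
    simp [pvMapD]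

theorem pvModify_insert_self (d : PySem.Dict String (List String)) (k : String)
    (v : List String) (g : List String → List String) (d0 : List String) :
    (d.insert k v).modify k d0 g = d.insert k (g v) := by
  simp [PySem.Dict.modify, PySem.Dict.getD_insert_self, PySem.Dict.insert_insert_self]

-- A's inner appends over one body collapse to one insert
theorem pvS1 (heading_prefix : String) (body : List String)
    (hb : ∀ l ∈ body, PySem.Str.startswith l heading_prefix = false) :
    ∀ (d : PySem.Dict String (List String)) (k : String) (acc : List String),
    body.foldl (pvStepA heading_prefix) (d.insert k acc, some k)
      = (d.insert k (acc ++ body), some k) := by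
  induction body with
  | nil => intro d k acc; simp
  | cons l body ih =>
    intro d k acc
    have hl := hb l (by simp)
    simp only [List.foldl_cons, pvStepA, hl, Bool.false_eq_true, if_false]
    rw [pvModify_insert_self]
    rw [ih (fun l' hl' => hb l' (List.mem_cons_of_mem _ hl')) d k (acc ++ [l])]
    simp

-- after a heading line, state (d, some h) and (d, none) fold alike
theorem pvSW (heading_prefix : String) (l : String) (r : List String)
    (hl : PySem.Str.startswith l heading_prefix = true)
    (D : PySem.Dict String (List String)) (h : Option String) :
    (l :: r).foldl (pvStepA heading_prefix) (D, h)
      = (l :: r).foldl (pvStepA heading_prefix) (D, none) := by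
  simp only [List.foldl_cons, pvStepA, hl, if_true]

theorem pvSwitch (heading_prefix : String) (X : List String)
    (D : PySem.Dict String (List String)) (h : String) :
    (((X.dropWhile (fun l => !(PySem.Str.startswith l heading_prefix))).foldl
        (pvStepA heading_prefix) (D, some h)).1)
      = (((X.dropWhile (fun l => !(PySem.Str.startswith l heading_prefix))).foldl
        (pvStepA heading_prefix) (D, none)).1) := by
  cases hc : X.dropWhile (fun l => !(PySem.Str.startswith l heading_prefix)) with
  | nil => rfl
  | cons l r =>
    have hne : X.dropWhile (fun l => !(PySem.Str.startswith l heading_prefix)) ≠ [] := by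
      rw [hc]; exact List.cons_ne_nil _ _
    have hpl := List.head_dropWhile_not (fun l => !(PySem.Str.startswith l heading_prefix)) hne
    simp only [hc, List.head_cons] at hpl
    rw [pvSW heading_prefix l r (by simpa using hpl)]

theorem pvFindEnd_drop (heading_prefix : String) (lines : List String) (i : Nat) :
    lines.drop (pvFindEnd heading_prefix lines lines.length i)
      = (lines.drop i).dropWhile (fun l => !(PySem.Str.startswith l heading_prefix)) := by
  fun_induction pvFindEnd heading_prefix lines lines.length i with
  | case1 i hcond ih =>
    simp only [Bool.and_eq_true, decide_eq_true_eq, Bool.not_eq_eq_eq_not, Bool.not_true] at hcond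
    obtain ⟨hin, hsw⟩ := hcond
    rw [List.drop_eq_getElem_cons hin, List.dropWhile_cons]
    rw [List.getD_eq_getElem lines "" hin] at hsw
    simp only [hsw, Bool.not_false, if_true]
    exact ih
  | case2 i hcond =>
    simp only [Bool.and_eq_true, decide_eq_true_eq, Bool.not_eq_eq_eq_not, Bool.not_true, not_and] at hcond
    by_cases hin : i < lines.length
    · have hsw := hcond hin
      rw [List.drop_eq_getElem_cons hin, List.dropWhile_cons]
      rw [List.getD_eq_getElem lines "" hin] at hsw
      have hsw' : PySem.Chars.startswith lines[i].toList heading_prefix.toList = true := by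
        revert hsw; simp
      simp [hsw', ← List.drop_eq_getElem_cons hin]
    · rw [List.drop_eq_nil_of_le (by omega)]
      simp

theorem pvFindEnd_take (heading_prefix : String) (lines : List String) (i : Nat) :
    (lines.drop i).takeWhile (fun l => !(PySem.Str.startswith l heading_prefix))
      = (lines.drop i).take (pvFindEnd heading_prefix lines lines.length i - i) := by
  fun_induction pvFindEnd heading_prefix lines lines.length i with
  | case1 i hcond ih =>
    simp only [Bool.and_eq_true, decide_eq_true_eq, Bool.not_eq_eq_eq_not, Bool.not_true] at hcond
    obtain ⟨hin, hsw⟩ := hcond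
    have hle := pvFindEnd_le heading_prefix lines lines.length (i + 1)
    rw [List.drop_eq_getElem_cons hin, List.takeWhile_cons]
    rw [List.getD_eq_getElem lines "" hin] at hsw
    simp only [hsw, Bool.not_false, if_true]
    rw [show pvFindEnd heading_prefix lines lines.length (i + 1) - i
        = (pvFindEnd heading_prefix lines lines.length (i + 1) - (i + 1)) + 1 by omega]
    rw [List.take_succ_cons]
    exact congrArg _ ih
  | case2 i hcond =>
    simp only [Bool.and_eq_true, decide_eq_true_eq, Bool.not_eq_eq_eq_not, Bool.not_true, not_and] at hcond
    by_cases hin : i < lines.length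
    · have hsw := hcond hin
      rw [List.drop_eq_getElem_cons hin, List.takeWhile_cons]
      rw [List.getD_eq_getElem lines "" hin] at hsw
      have hsw' : PySem.Chars.startswith lines[i].toList heading_prefix.toList = true := by
        revert hsw; simp
      simp [hsw']
    · rw [List.drop_eq_nil_of_le (by omega)]
      simp

theorem pvMain (heading_prefix : String) (lines : List String) :
    ∀ (fuel i : Nat) (dA : PySem.Dict String (List String)), lines.length - i ≤ fuel →
    pvMapD (((lines.drop i).foldl (pvStepA heading_prefix) (dA, none)).1)
      = pvAltGo heading_prefix lines lines.length i (pvMapD dA) := by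
  intro fuel
  induction fuel with
  | zero =>
    intro i dA hf
    rw [List.drop_eq_nil_of_le (by omega), pvAltGo, if_neg (by omega)]
    rfl
  | succ fuel ih =>
    intro i dA hf
    by_cases hin : i < lines.length
    · rw [List.drop_eq_getElem_cons hin, List.foldl_cons, pvAltGo, if_pos hin]
      simp only [List.getD_eq_getElem lines "" hin]
      by_cases hsw : PySem.Str.startswith lines[i] heading_prefix = true
      · simp only [pvStepA, hsw, if_true]
        rw [← List.takeWhile_append_dropWhile
          (p := fun l => !(PySem.Str.startswith l heading_prefix)) (l := lines.drop (i + 1)),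
          List.foldl_append,
          pvS1 heading_prefix _ (fun l hl => by simpa using List.mem_takeWhile_imp hl) dA _ [],
          List.nil_append, pvSwitch heading_prefix (lines.drop (i + 1)),
          ← pvFindEnd_drop heading_prefix lines (i + 1)]
        have hle := pvFindEnd_le heading_prefix lines lines.length (i + 1)
        rw [ih (pvFindEnd heading_prefix lines lines.length (i + 1)) _ (by omega),
          pvMapD_insert, pvFindEnd_take heading_prefix lines (i + 1),
          PySem.List.slice_natCast]
        rfl
      · have hsw' : PySem.Str.startswith lines[i] heading_prefix = false :=
          Bool.eq_false_iff.mpr hsw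
        simp only [pvStepA, hsw', Bool.false_eq_true, if_false]
        rw [ih (i + 1) dA (by omega)]
    · rw [List.drop_eq_nil_of_le (by omega), pvAltGo, if_neg (by omega)]
      rfl

-- ===== VERDICT (by name: the statement is the Claim_ definition above) =====
theorem split_by_heading_py_spec : Claim_equal_split_by_heading_py := by
  intro text heading_prefix _
  unfold Spec_split_by_heading_py split_by_heading_py split_by_heading_py_alt
  have := pvMain heading_prefix (PySem.Str.splitlines text)
    (PySem.Str.splitlines text).length 0 PySem.Dict.empty (by omega)
  simp only [List.drop_zero] at this
  have he : pvMapD PySem.Dict.empty = PySem.Dict.empty := rfl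
  rw [he] at this
  exact congrArg PySem.Dict.items this
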